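-- pv_equiv track=rewrite | github.com/samarthgowda96/algos | leetcode/countingEle.py | countingEle
-- ===== SOURCE A (Python) =====
-- def countingEle(arr):
--     book={}
--     for i in arr:
--         book[i]=1
--     res=0
--     for i in arr:
--         if i+1 in book:
--             res+=1
--     return res
-- ===== SOURCE B (Python) =====
-- def _bisect_left(s, x):
--     lo, hi = 0, len(s)
--     while lo < hi:
--         mid = (lo + hi) // 2
--         if s[mid] < x:
--             lo = mid + 1
--         else:
--             hi = mid
--     return lo
--
--
-- def countingEle(arr):
--     s = sorted(arr)
--     res = 0
--     for i in arr:
--         j = _bisect_left(s, i + 1)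
--         if j < len(s) and s[j] == i + 1:
--             res += 1
--     return res
-- ===== Notes on version B (the rewrite author's own statement) =====
-- stated objective: alternative
-- what changed: Replaces the hash-table (dict of keys) membership strategy with sort-then-binary-search: B sorts a copy of arr once and tests each i+1 by bisect_left on the sorted list.
import Mathlib
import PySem

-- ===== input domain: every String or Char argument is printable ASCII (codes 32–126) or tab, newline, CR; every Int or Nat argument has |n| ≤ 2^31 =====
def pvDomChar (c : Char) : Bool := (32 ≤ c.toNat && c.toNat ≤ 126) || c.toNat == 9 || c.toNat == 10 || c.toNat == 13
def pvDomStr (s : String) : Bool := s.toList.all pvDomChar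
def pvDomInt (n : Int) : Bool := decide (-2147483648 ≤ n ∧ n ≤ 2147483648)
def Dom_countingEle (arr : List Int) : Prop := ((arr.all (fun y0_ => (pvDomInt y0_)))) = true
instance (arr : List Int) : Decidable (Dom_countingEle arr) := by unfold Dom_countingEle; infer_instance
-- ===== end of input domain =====

-- B replaces A's hash-table membership (dict of keys) with a sort-then-binary-search membership test; alternative decomposition, same results.


-- ===== PORT A =====
def countingEle (arr : List Int) : Int :=
  let book : PySem.Dict Int Int := arr.foldl (fun d i => d.insert i 1) PySem.Dict.empty
  arr.foldl (fun res i => if book.contains (i + 1) then res + 1 else res) 0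

-- ===== PORT B =====
-- Source B's hand-written _bisect_left is exactly Python's bisect.bisect_left, ported as PySem.List.bisectLeft
def countingEle_alt (arr : List Int) : Int :=
  let s := PySem.List.sorted arr (fun x => x) false
  arr.foldl (fun res i =>
    let j := PySem.List.bisectLeft s (i + 1)
    if j < s.length ∧ s.getD j 0 = i + 1 then res + 1 else res) 0

-- ===== PRECONDITION & SPEC =====
def Spec_countingEle (arr : List Int) (out : Int) : Prop := out = countingEle_alt arr
instance (arr : List Int) (out : Int) : Decidable (Spec_countingEle arr out) := by unfold Spec_countingEle; infer_instance

-- ===== CLAIM (what is proved, stated in full; the proofs are below) =====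
def Claim_equal_countingEle : Prop := ∀ (arr : List Int), Dom_countingEle arr → Spec_countingEle arr (countingEle arr)

-- ===== LEMMAS AND PROOFS =====

-- A's dict membership test is membership in arr
theorem contains_book (arr : List Int) (x : Int) :
    (arr.foldl (fun (d : PySem.Dict Int Int) i => d.insert i 1) PySem.Dict.empty).contains x = true
      ↔ x ∈ arr := by
  rw [PySem.Dict.contains_iff_mem_keys]
  rw [PySem.Dict.keys_foldl_insert arr (fun _ i => (1 : Int)) PySem.Dict.empty]
  simp [pysem]

-- B's bisect check is membership in the sorted list
theorem bisect_check (s : List Int) (x : Int)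
    (hp : List.Pairwise (fun a b => a ≤ b) s) :
    (PySem.List.bisectLeft s x < s.length ∧ s.getD (PySem.List.bisectLeft s x) 0 = x)
      ↔ x ∈ s := by
  obtain ⟨hle, hlt, hge⟩ := PySem.List.bisectLeft_spec s x hp
  set j := PySem.List.bisectLeft s x with hj
  constructor
  · rintro ⟨h1, h2⟩
    rw [List.getD_eq_getElem s 0 h1] at h2
    exact h2 ▸ List.getElem_mem h1
  · intro hx
    obtain ⟨k, hk, hks⟩ := List.getElem_of_mem hx
    have hjk : j ≤ k := by
      by_contra h
      have := hlt k hk (by omega)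
      omega
    have hjlen : j < s.length := lt_of_le_of_lt hjk hk
    refine ⟨hjlen, ?_⟩
    rw [List.getD_eq_getElem s 0 hjlen]
    have h1 : x ≤ s[j] := hge j hjlen le_rfl
    have h2 : s[j] ≤ s[k] := by
      rcases eq_or_lt_of_le hjk with h | h
      · simp [h]
      · exact (List.pairwise_iff_getElem.mp hp) j k hjlen hk h
    omega

theorem countingEle_eq (arr : List Int) : countingEle arr = countingEle_alt arr := by
  unfold countingEle countingEle_alt
  have hp := PySem.List.sorted_pairwise arr (fun x => x)
  show List.foldl _ 0 arr = List.foldl _ 0 arr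
  congr 1
  funext res i
  have h : ((arr.foldl (fun (d : PySem.Dict Int Int) i => d.insert i 1) PySem.Dict.empty).contains (i + 1) = true)
      ↔ (PySem.List.bisectLeft (PySem.List.sorted arr (fun x => x) false) (i + 1) <
            (PySem.List.sorted arr (fun x => x) false).length ∧
          (PySem.List.sorted arr (fun x => x) false).getD
            (PySem.List.bisectLeft (PySem.List.sorted arr (fun x => x) false) (i + 1)) 0 = i + 1) := by
    rw [contains_book, bisect_check _ _ hp, PySem.List.mem_sorted]
  exact if_congr h rfl rfl

-- ===== VERDICT (by name: the statement is the Claim_ definition above) =====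
theorem countingEle_spec : Claim_equal_countingEle := by
  intro arr _
  exact countingEle_eq arr
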